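-- pv_equiv track=rewrite | github.com/kasbench/globeco-portfolio-service | app/batch_validation.py | find_duplicates_fast
-- ===== SOURCE A (Python) =====
-- from typing import List, Set, Dict, Tuple, Optional
--
-- def find_duplicates_fast(names: List[str]) -> List[str]:
--     """
--     Fast duplicate detection using set-based approach for O(n) performance.
--
--     Args:
--         names: List of portfolio names to check for duplicates
--
--     Returns:
--         List of duplicate names (original case preserved)
--     """
--     if not names:
--         return []
--
--     seen_normalized: Set[str] = set()
--     duplicates: List[str] = []
--     name_mapping: Dict[str, str] = {}  # normalized -> original
--
--     for name in names:
--         # Normalize name for comparison (strip whitespace, lowercase)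
--         normalized_name = name.strip().lower()
--
--         if normalized_name in seen_normalized:
--             # Found duplicate - use original case from first occurrence
--             original_name = name_mapping.get(normalized_name, name)
--             if original_name not in duplicates:
--                 duplicates.append(original_name)
--         else:
--             seen_normalized.add(normalized_name)
--             name_mapping[normalized_name] = name
--
--     return duplicates
-- ===== SOURCE B (Python) =====
-- from typing import List
--
--
-- def find_duplicates_fast(names: List[str]) -> List[str]:
--     # A name is reported exactly at the second occurrence of its normalized form,
--     # and the value reported is the original at the first occurrence.
--     normalized = [name.strip().lower() for name in names]
--     return [names[normalized.index(k)]
--             for i, k in enumerate(normalized)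
--             if normalized[:i].count(k) == 1]
-- ===== Notes on version B (the rewrite author's own statement) =====
-- stated objective: simpler
-- what changed: Replaces A's streaming pass with a seen-set, a normalized->original dict and a dedup membership scan by a declarative comprehension: a name is emitted exactly when its normalized form has count 1 in the strict prefix (i.e. at its second occurrence), and the emitted value is the original at the first occurrence found with .index.
import Mathlib
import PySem

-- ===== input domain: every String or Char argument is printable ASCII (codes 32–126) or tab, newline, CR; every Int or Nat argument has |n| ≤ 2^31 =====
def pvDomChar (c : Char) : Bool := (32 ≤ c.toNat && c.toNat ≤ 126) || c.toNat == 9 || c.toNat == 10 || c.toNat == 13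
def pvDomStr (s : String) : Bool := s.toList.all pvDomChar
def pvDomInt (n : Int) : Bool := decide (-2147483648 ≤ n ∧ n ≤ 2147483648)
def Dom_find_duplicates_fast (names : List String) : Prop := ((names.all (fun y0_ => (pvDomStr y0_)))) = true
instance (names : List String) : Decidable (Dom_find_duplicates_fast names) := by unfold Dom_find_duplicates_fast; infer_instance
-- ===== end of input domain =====

-- B is a simpler, declarative re-implementation (prefix-count/first-index comprehension) of A's
-- streaming seen-set + mapping-dict + dedup-scan pass; equal return value, no claim about speed.

-- ===== PORT A =====
-- loop body of A's 'for name in names' over the state (seen_normalized, duplicates, name_mapping)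
def pvStepA (st : PySem.Set String × List String × PySem.Dict String String) (name : String) :
    PySem.Set String × List String × PySem.Dict String String :=
  let normalized := PySem.Str.lower (PySem.Str.strip name)
  if PySem.Set.contains st.1 normalized then
    let original := (PySem.Dict.get? st.2.2 normalized).getD name
    if st.2.1.contains original then st
    else (st.1, st.2.1 ++ [original], st.2.2)
  else (PySem.Set.add st.1 normalized, st.2.1, PySem.Dict.insert st.2.2 normalized name)

def find_duplicates_fast (names : List String) : List String :=
  if names = [] then []
  else (names.foldl pvStepA (PySem.Set.empty, [], PySem.Dict.empty)).2.1

-- ===== PORT B =====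
-- 'normalized.index(k)' always succeeds (k ∈ normalized), so the '.getD 0' default is unreachable,
-- and the resulting index is in range for 'names', so pyGetD's default "" is unreachable too.
def find_duplicates_fast_alt (names : List String) : List String :=
  let normalized := names.map (fun name => PySem.Str.lower (PySem.Str.strip name))
  ((PySem.List.enumerate normalized 0).filter
      (fun p => (PySem.List.slice normalized none (some p.1)).count p.2 == 1)).map
    (fun p => PySem.List.pyGetD names (((PySem.List.index? normalized p.2).getD 0 : Nat) : Int) "")

-- ===== PRECONDITION & SPEC =====
def Spec_find_duplicates_fast (names : List String) (out : List String) : Prop := out = find_duplicates_fast_alt names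
instance (names : List String) (out : List String) : Decidable (Spec_find_duplicates_fast names out) := by unfold Spec_find_duplicates_fast; infer_instance

-- ===== CLAIM (what is proved, stated in full; the proofs are below) =====
def Claim_equal_find_duplicates_fast : Prop := ∀ (names : List String), Dom_find_duplicates_fast names → Spec_find_duplicates_fast names (find_duplicates_fast names)

-- ===== LEMMAS AND PROOFS =====

-- normalization used by both programs (name.strip().lower())
def pvKey (s : String) : String := PySem.Str.lower (PySem.Str.strip s)

-- the original at the first occurrence of normalized key c
def pvFirst (l : List String) (c : String) : String :=
  PySem.List.pyGetD l (((PySem.List.index? (l.map pvKey) c).getD 0 : Nat) : Int) ""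

-- pyGetD into l ++ [x] at a first-occurrence index of a key present in l
theorem pv_first_aux (l : List String) (x c : String) (hc : c ∈ l.map pvKey) :
    PySem.List.pyGetD (l ++ [x])
        (((PySem.List.index? (l.map pvKey ++ [pvKey x]) c).getD 0 : Nat) : Int) "" = pvFirst l c := by
  obtain ⟨j, hj⟩ := Option.isSome_iff_exists.mp ((PySem.List.index?_isSome_iff _ _).mpr hc)
  obtain ⟨hlt, -, -⟩ := PySem.List.getElem_of_index?_eq_some hj
  have hjl : j < l.length := by simpa using hlt
  rw [PySem.List.index?_append_of_mem _ hc, hj]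
  unfold pvFirst
  rw [hj]
  simp only [Option.getD_some, PySem.List.pyGetD_natCast]
  rw [List.getD_eq_getElem _ "" (by simp; omega), List.getD_eq_getElem _ "" hjl,
    List.getElem_append_left hjl]

theorem pv_alt_snoc (l : List String) (x : String) :
    find_duplicates_fast_alt (l ++ [x]) =
      find_duplicates_fast_alt l ++
        (if (l.map pvKey).count (pvKey x) = 1 then [pvFirst l (pvKey x)] else []) := by
  simp only [find_duplicates_fast_alt, List.map_append, List.map_cons, List.map_nil,
    PySem.List.enumerate_append, List.filter_append]
  congr 1
  · -- prefix part equals find_duplicates_fast_alt l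
    rw [List.filter_congr (q := fun p =>
        (PySem.List.slice (l.map fun name => PySem.Str.lower (PySem.Str.strip name)) none (some p.1)).count p.2 == 1) ?_]
    · apply List.map_congr_left
      intro p hp
      have hp' := List.mem_filter.mp hp |>.1
      obtain ⟨i, hi, rfl⟩ := (PySem.List.mem_enumerate_iff _ _ _).mp hp'
      have hmem : (l.map fun name => PySem.Str.lower (PySem.Str.strip name))[i] ∈
          (l.map fun name => PySem.Str.lower (PySem.Str.strip name)) := List.getElem_mem hi
      exact pv_first_aux l x _ hmem
    · intro p hp
      obtain ⟨i, hi, rfl⟩ := (PySem.List.mem_enumerate_iff _ _ _).mp hp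
      simp only [zero_add]
      rw [PySem.List.slice_to_natCast, PySem.List.slice_to_natCast,
        List.take_append_of_le_length (by simpa using Nat.le_of_lt hi)]
  · -- suffix part
    have he : PySem.List.enumerate [PySem.Str.lower (PySem.Str.strip x)]
        (0 + ((l.map fun name => PySem.Str.lower (PySem.Str.strip name)).length : Int)) =
        [((l.length : Int), PySem.Str.lower (PySem.Str.strip x))] := by
      simp [PySem.List.enumerate]
    rw [he]
    have hsl : PySem.List.slice
        ((l.map fun name => PySem.Str.lower (PySem.Str.strip name)) ++ [PySem.Str.lower (PySem.Str.strip x)])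
        none (some ((l.length : Int))) = l.map fun name => PySem.Str.lower (PySem.Str.strip name) := by
      rw [PySem.List.slice_to_natCast]
      rw [List.take_append_of_le_length (by simp)]
      simp
    simp only [List.filter, hsl]
    by_cases hcnt : ((l.map fun name => PySem.Str.lower (PySem.Str.strip name)).count
        (PySem.Str.lower (PySem.Str.strip x))) = 1
    · have hmem : PySem.Str.lower (PySem.Str.strip x) ∈ (l.map fun name => PySem.Str.lower (PySem.Str.strip name)) := by
        rw [← List.count_pos_iff]; omega
      have : (pvKey x ∈ l.map pvKey) := hmem
      rw [if_pos (by simpa [pvKey] using hcnt)]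
      have hb : (List.count (PySem.Str.lower (PySem.Str.strip x))
          (l.map fun name => PySem.Str.lower (PySem.Str.strip name)) == 1) = true :=
        beq_iff_eq.mpr hcnt
      simp only [hb, List.map_cons, List.map_nil, List.cons.injEq, and_true]
      exact pv_first_aux l x _ hmem
    · rw [if_neg (by simpa [pvKey] using hcnt)]
      have hb : (List.count (PySem.Str.lower (PySem.Str.strip x))
          (l.map fun name => PySem.Str.lower (PySem.Str.strip name)) == 1) = false := by
        simpa using hcnt
      simp [hb]

theorem pv_occ_exists (ys : List String) (k : String) (m : Nat) (h : m < ys.count k) :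
    ∃ i, ∃ hi : i < ys.length, ys[i] = k ∧ (ys.take i).count k = m := by
  induction ys generalizing m with
  | nil => simp at h
  | cons y t ih =>
    by_cases hy : y = k
    · subst hy
      cases m with
      | zero => exact ⟨0, by simp, by simp, by simp⟩
      | succ m' =>
        have h' : m' < t.count y := by simpa [List.count_cons_self] using h
        obtain ⟨i, hi, he, hc⟩ := ih m' h'
        exact ⟨i + 1, by simpa using hi, by simpa using he, by simp [hc]⟩
    · have h' : m < t.count k := by simpa [List.count_cons, hy] using h
      obtain ⟨i, hi, he, hc⟩ := ih m h'
      exact ⟨i + 1, by simpa using hi, by simpa using he, by simp [hc, hy]⟩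

theorem pv_two (ys : List String) (i : Nat) (hi : i < ys.length) (k : String)
    (hk : ys[i] = k) (h1 : (ys.take i).count k = 1) : 2 ≤ ys.count k := by
  have hsp : ys.count k = (ys.take i).count k + (ys.drop i).count k := by
    rw [← List.count_append, List.take_append_drop]
  have hd : ys.drop i = k :: ys.drop (i + 1) := by
    rw [List.drop_eq_getElem_cons hi, hk]
  rw [hsp, hd, h1]
  simp
  omega

theorem pv_mem_alt (l : List String) (s : String) :
    s ∈ find_duplicates_fast_alt l ↔
      ∃ c, 2 ≤ (l.map pvKey).count c ∧ s = pvFirst l c := by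
  simp only [find_duplicates_fast_alt, List.mem_map, List.mem_filter]
  constructor
  · rintro ⟨p, ⟨hpe, hpc⟩, rfl⟩
    obtain ⟨i, hi, rfl⟩ := (PySem.List.mem_enumerate_iff _ _ _).mp hpe
    refine ⟨(l.map pvKey)[i]'(by simpa using hi), ?_, rfl⟩
    simp only [zero_add, PySem.List.slice_to_natCast] at hpc
    exact pv_two _ i (by simpa using hi) _ rfl (by simpa using hpc)
  · rintro ⟨c, hc, rfl⟩
    obtain ⟨i, hi, he, hcnt⟩ := pv_occ_exists (l.map pvKey) c 1 (by omega)
    refine ⟨(0 + (i : Int), (l.map fun name => PySem.Str.lower (PySem.Str.strip name))[i]'(by simpa using hi)), ⟨?_, ?_⟩, ?_⟩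
    · exact (PySem.List.mem_enumerate_iff _ _ _).mpr ⟨i, by simpa using hi, rfl⟩
    · simp only [zero_add, PySem.List.slice_to_natCast]
      have he' : (l.map fun name => PySem.Str.lower (PySem.Str.strip name))[i]'(by simpa using hi) = c := he
      rw [he']
      simpa using hcnt
    · have he' : (l.map fun name => PySem.Str.lower (PySem.Str.strip name))[i]'(by simpa using hi) = c := he
      rw [he']
      rfl

def pvAst (l : List String) : PySem.Set String × List String × PySem.Dict String String :=
  l.foldl pvStepA (PySem.Set.empty, [], PySem.Dict.empty)

theorem pv_key_first {l : List String} {k : String} (hk : k ∈ l.map pvKey) :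
    pvKey (pvFirst l k) = k := by
  have hs : (PySem.List.index? (l.map pvKey) k).isSome := by
    rw [PySem.List.index?_isSome_iff]; exact hk
  obtain ⟨j, hj⟩ := Option.isSome_iff_exists.mp hs
  obtain ⟨hlt, he, -⟩ := PySem.List.getElem_of_index?_eq_some hj
  have hjl : j < l.length := by simpa using hlt
  unfold pvFirst
  rw [hj]
  simp only [Option.getD_some]
  rw [PySem.List.pyGetD_natCast]
  rw [List.getD_eq_getElem l "" hjl]
  simpa [List.getElem_map] using he

-- appending a repeated key does not change first-occurrence lookups
theorem pv_index_snoc_of_mem {N : List String} {k : String} (hk : k ∈ N) (c : String) :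
    PySem.List.index? (N ++ [k]) c = PySem.List.index? N c := by
  by_cases hc : c ∈ N
  · exact PySem.List.index?_append_of_mem _ hc
  · have hck : c ≠ k := fun h => hc (h ▸ hk)
    rw [(PySem.List.index?_eq_none_iff _ _).mpr hc, (PySem.List.index?_eq_none_iff _ _).mpr (by simp [hc, hck])]

theorem pv_getD_aux {l : List String} {c : String} {j : Nat} (x : String)
    (hj : PySem.List.index? (l.map pvKey) c = some j) :
    PySem.List.pyGetD (l ++ [x]) (j : Int) "" = PySem.List.pyGetD l (j : Int) "" := by
  obtain ⟨hlt, -, -⟩ := PySem.List.getElem_of_index?_eq_some hj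
  have hjl : j < l.length := by simpa using hlt
  simp only [PySem.List.pyGetD_natCast]
  rw [List.getD_eq_getElem _ "" (by simp; omega), List.getD_eq_getElem _ "" hjl,
    List.getElem_append_left hjl]

set_option maxHeartbeats 2000000 in
theorem pv_inv (l : List String) :
    (pvAst l).1 = PySem.Set.ofList (l.map pvKey) ∧
    (∀ c, (pvAst l).2.2.get? c =
        (PySem.List.index? (l.map pvKey) c).map (fun (j : Nat) => PySem.List.pyGetD l (j : Int) "")) ∧
    (pvAst l).2.1 = find_duplicates_fast_alt l := by
  induction l using List.reverseRecOn with
  | nil =>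
    refine ⟨rfl, fun c => ?_, rfl⟩
    simp [pvAst, PySem.Dict.get?, PySem.Dict.empty]
  | append_singleton l x ih =>
    obtain ⟨h1, h2, h3⟩ := ih
    have hstep : pvAst (l ++ [x]) = pvStepA (pvAst l) x := by
      simp [pvAst, List.foldl_append]
    rw [hstep]
    unfold pvStepA
    rw [show PySem.Str.lower (PySem.Str.strip x) = pvKey x from rfl]
    by_cases hmem : pvKey x ∈ l.map pvKey
    · have hcont : PySem.Set.contains (pvAst l).1 (pvKey x) = true := by
        rw [h1, PySem.Set.contains_iff, PySem.Set.mem_ofList]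
        exact hmem
      rw [if_pos hcont]
      obtain ⟨j, hj⟩ := Option.isSome_iff_exists.mp ((PySem.List.index?_isSome_iff _ _).mpr hmem)
      have horig : ((pvAst l).2.2.get? (pvKey x)).getD x = pvFirst l (pvKey x) := by
        rw [h2, hj]
        unfold pvFirst
        rw [hj]
        rfl
      rw [horig]
      by_cases hcnt : (l.map pvKey).count (pvKey x) = 1
      · have hnotmem : pvFirst l (pvKey x) ∉ (pvAst l).2.1 := by
          rw [h3]
          intro hin
          obtain ⟨c, hc2, hceq⟩ := (pv_mem_alt l _).mp hin
          have hck : c = pvKey x := by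
            have h1k := pv_key_first hmem
            have h2k := pv_key_first (l := l) (k := c)
              (by rw [← List.count_pos_iff]; omega)
            rw [hceq] at h1k
            exact h2k.symm.trans h1k
          rw [hck] at hc2
          omega
        rw [if_neg (by simpa using hnotmem)]
        refine ⟨?_, fun c => ?_, ?_⟩
        · rw [h1, List.map_append, List.map_cons, List.map_nil,
            PySem.Set.ofList_append_singleton, PySem.Set.add_of_mem (by rwa [PySem.Set.mem_ofList])]
        · rw [h2 c, List.map_append, List.map_cons, List.map_nil,
            pv_index_snoc_of_mem hmem c]
          cases hic : PySem.List.index? (l.map pvKey) c with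
          | none => rfl
          | some j' => simp only [Option.map_some, pv_getD_aux x hic]
        · rw [h3, pv_alt_snoc, if_pos hcnt]
      · have hge2 : 2 ≤ (l.map pvKey).count (pvKey x) := by
          have : 0 < (l.map pvKey).count (pvKey x) := List.count_pos_iff.mpr hmem
          omega
        have hinmem : pvFirst l (pvKey x) ∈ (pvAst l).2.1 := by
          rw [h3]
          exact (pv_mem_alt l _).mpr ⟨pvKey x, hge2, rfl⟩
        rw [if_pos (by simpa using hinmem)]
        refine ⟨?_, fun c => ?_, ?_⟩
        · rw [h1, List.map_append, List.map_cons, List.map_nil,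
            PySem.Set.ofList_append_singleton, PySem.Set.add_of_mem (by rwa [PySem.Set.mem_ofList])]
        · rw [h2 c, List.map_append, List.map_cons, List.map_nil,
            pv_index_snoc_of_mem hmem c]
          cases hic : PySem.List.index? (l.map pvKey) c with
          | none => rfl
          | some j' => simp only [Option.map_some, pv_getD_aux x hic]
        · rw [h3, pv_alt_snoc, if_neg hcnt]
          simp
    · have hcont : PySem.Set.contains (pvAst l).1 (pvKey x) = false := by
        rw [h1]
        simp only [PySem.Set.contains_eq_listContains]
        simpa [PySem.Set.mem_ofList] using hmem
      rw [if_neg (by rw [hcont]; simp)]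
      refine ⟨?_, fun c => ?_, ?_⟩ <;> dsimp only
      · rw [h1, List.map_append, List.map_cons, List.map_nil, PySem.Set.ofList_append_singleton]
      · by_cases hck : c = pvKey x
        · subst hck
          rw [PySem.Dict.get?_insert_self, List.map_append, List.map_cons, List.map_nil,
            PySem.List.index?_append_singleton_self _ _ hmem]
          simp only [Option.map_some]
          rw [PySem.List.pyGetD_natCast]
          congr 1
          rw [List.length_map] at *
          rw [List.getD_eq_getElem _ "" (by simp)]
          simp
        · rw [PySem.Dict.get?_insert_of_ne _ _ hck, h2 c, List.map_append, List.map_cons, List.map_nil]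
          by_cases hc : c ∈ l.map pvKey
          · rw [PySem.List.index?_append_of_mem _ hc]
            cases hic : PySem.List.index? (l.map pvKey) c with
            | none => rfl
            | some j' => simp only [Option.map_some, pv_getD_aux x hic]
          · rw [(PySem.List.index?_eq_none_iff _ _).mpr hc,
              (PySem.List.index?_eq_none_iff _ _).mpr (by simp [hc, hck])]
            rfl
      · rw [h3, pv_alt_snoc, if_neg (by simp [List.count_eq_zero_of_not_mem hmem])]
        simp

-- ===== VERDICT (by name: the statement is the Claim_ definition above) =====
theorem find_duplicates_fast_spec : Claim_equal_find_duplicates_fast := by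
  intro names _
  unfold Spec_find_duplicates_fast find_duplicates_fast
  rcases pv_inv names with ⟨-, -, h⟩
  split
  · subst_vars; rfl
  · exact h
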